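-- pv_equiv track=rewrite | github.com/Radcliffe/OEIS-Python | src/oeispy/A364/A364604.py | A364604
-- ===== SOURCE A (Python) =====
-- def A364604(N):
--     a = [0]*N; z=s=0
--     while(s<N):
--         z+=1; m=0; i=s
--         while(i<N):
--             if not a[i]:
--                 a[i]=z; i+=2**m; m+=1
--             i+=1
--         s+=1
--     return a
-- ===== SOURCE B (Python) =====
-- def A364604(N):
--     n = N if N > 0 else 0
--     a = [0] * n
--     nxt = list(range(1, n + 2))  # nxt[x]: candidate next empty cell at index >= x+1 (for filled x)
--
--     def find(x):
--         # first empty cell at index >= x (or an index >= n if none), with path compression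
--         r = x
--         while r < n and a[r]:
--             r = nxt[r]
--         while x < n and a[x]:
--             nxt[x], x = r, nxt[x]
--         return r
--
--     for s in range(n):
--         z = s + 1
--         m = 0
--         i = find(s)
--         while i < n:
--             a[i] = z
--             nxt[i] = i + 1
--             i = find(i + 2 ** m + 1)
--             m += 1
--     return a
-- ===== Notes on version B (the rewrite author's own statement) =====
-- stated objective: faster
-- what changed: A steps cell-by-cell over already-filled runs on every pass; B keeps a path-compressed next-empty-pointer array (union-find style) and jumps straight to the first empty cell at or after each target index.
import Mathlib
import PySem

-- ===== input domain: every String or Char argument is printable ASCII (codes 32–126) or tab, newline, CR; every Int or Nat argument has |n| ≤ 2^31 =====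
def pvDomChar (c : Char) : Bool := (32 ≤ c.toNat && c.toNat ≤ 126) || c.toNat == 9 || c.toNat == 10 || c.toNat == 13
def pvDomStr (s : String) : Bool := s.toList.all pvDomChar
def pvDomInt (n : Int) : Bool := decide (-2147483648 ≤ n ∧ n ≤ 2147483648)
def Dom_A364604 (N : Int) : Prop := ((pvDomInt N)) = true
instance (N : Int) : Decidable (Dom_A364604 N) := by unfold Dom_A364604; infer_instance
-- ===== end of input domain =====

-- B replaces A's cell-by-cell stepping over already-filled runs by a path-compressed
-- next-empty-pointer (union-find style) jump; objective: faster.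

-- ===== PORT A =====
-- inner while loop of A: scan from i, assign z to empty cells with widening skips;
-- the fuel n+1 only makes the transcription total (i strictly increases each iteration)
def pvInnerA (n : Nat) (z : Int) : Nat → List Int → Nat → Nat → List Int
  | 0, a, _, _ => a
  | f + 1, a, i, m =>
    if i < n then
      if a.getD i 0 = 0 then
        pvInnerA n z f (a.set i z) (i + 2 ^ m + 1) (m + 1)
      else
        pvInnerA n z f a (i + 1) m
    else a

-- outer while loop of A: s and z are carried exactly as in the Python;
-- the fuel n+1 only makes the transcription total (s increments once per pass)
def pvOuterA (n : Nat) : Nat → List Int → Int → Nat → List Int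
  | 0, a, _, _ => a
  | f + 1, a, z, s =>
    if s < n then pvOuterA n f (pvInnerA n (z + 1) (n + 1) a s 0) (z + 1) (s + 1) else a

def A364604 (N : Int) : List Int :=
  pvOuterA N.toNat (N.toNat + 1) (List.replicate N.toNat 0) 0 0

-- ===== PORT B =====
-- B's find, first loop: follow nxt pointers from r to the first empty cell (or past n);
-- the fuel n+1 only makes the transcription total (the pointers strictly increase)
def pvFindRoot (n : Nat) (a : List Int) (nxt : List Nat) : Nat → Nat → Nat
  | 0, r => r
  | f + 1, r =>
    if r < n ∧ a.getD r 0 ≠ 0 then pvFindRoot n a nxt f (nxt.getD r (r + 1)) else r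

-- B's find, second loop: path compression — point every visited cell at the root r
def pvCompress (n : Nat) (a : List Int) (r : Nat) : Nat → List Nat → Nat → List Nat
  | 0, nxt, _ => nxt
  | f + 1, nxt, x =>
    if x < n ∧ a.getD x 0 ≠ 0 then
      pvCompress n a r f (nxt.set x r) (nxt.getD x (x + 1))
    else nxt

def pvFind (n : Nat) (a : List Int) (nxt : List Nat) (x : Nat) : List Nat × Nat :=
  let r := pvFindRoot n a nxt (n + 1) x
  (pvCompress n a r (n + 1) nxt x, r)

-- B's inner while loop; the fuel n+1 only makes the transcription total
-- (the scan index i strictly increases)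
def pvInnerB (n : Nat) (z : Int) : Nat → List Int → List Nat → Nat → Nat → List Int × List Nat
  | 0, a, nxt, _, _ => (a, nxt)
  | f + 1, a, nxt, i, m =>
    if i < n then
      let a' := a.set i z
      let nxt' := nxt.set i (i + 1)
      let p := pvFind n a' nxt' (i + 2 ^ m + 1)
      pvInnerB n z f a' p.1 p.2 (m + 1)
    else (a, nxt)

-- B's for loop over s; the fuel n+1 only makes the transcription total
def pvOuterB (n : Nat) : Nat → List Int → List Nat → Nat → List Int
  | 0, a, _, _ => a
  | f + 1, a, nxt, s =>
    if s < n then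
      let p := pvFind n a nxt s
      let q := pvInnerB n ((s : Int) + 1) (n + 1) a p.1 p.2 0
      pvOuterB n f q.1 q.2 (s + 1)
    else a

def A364604_alt (N : Int) : List Int :=
  let n := N.toNat
  pvOuterB n (n + 1) (List.replicate n 0) ((List.range (n + 1)).map (· + 1)) 0

-- ===== PRECONDITION & SPEC =====
def Spec_A364604 (N : Int) (out : List Int) : Prop := out = A364604_alt N
instance (N : Int) (out : List Int) : Decidable (Spec_A364604 N out) := by unfold Spec_A364604; infer_instance

-- ===== CLAIM (what is proved, stated in full; the proofs are below) =====
def Claim_equal_A364604 : Prop := ∀ (N : Int), Dom_A364604 N → Spec_A364604 N (A364604 N)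

-- ===== LEMMAS AND PROOFS =====

theorem getD_set_self {α : Type} (l : List α) (i : Nat) (a d : α) (h : i < l.length) :
    (l.set i a).getD i d = a := by
  rw [List.getD, List.getElem?_set_self h]; rfl

theorem getD_set_ne {α : Type} (l : List α) (i j : Nat) (a d : α) (h : i ≠ j) :
    (l.set i a).getD j d = l.getD j d := by
  rw [List.getD, List.getElem?_set_ne h, ← List.getD]

-- index of the first empty cell at position ≥ i (n if none)
def firstEmpty (n : Nat) (a : List Int) (i : Nat) : Nat :=
  if _ : i < n then (if a.getD i 0 = 0 then i else firstEmpty n a (i + 1)) else n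
termination_by n - i

theorem fe_le (n : Nat) (a : List Int) (i : Nat) : firstEmpty n a i ≤ n := by
  fun_induction firstEmpty <;> omega

theorem fe_ge (n : Nat) (a : List Int) (i : Nat) (h : i ≤ n) : i ≤ firstEmpty n a i := by
  fun_induction firstEmpty <;> omega

theorem fe_stop (n : Nat) (a : List Int) (i : Nat) (h : ¬ i < n) : firstEmpty n a i = n := by
  rw [firstEmpty, dif_neg h]

theorem fe_empty (n : Nat) (a : List Int) (i : Nat) (h : i < n) (he : a.getD i 0 = 0) :
    firstEmpty n a i = i := by
  rw [firstEmpty, dif_pos h, if_pos he]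

theorem fe_filled (n : Nat) (a : List Int) (i : Nat) (h : i < n) (he : a.getD i 0 ≠ 0) :
    firstEmpty n a i = firstEmpty n a (i + 1) := by
  rw [firstEmpty, dif_pos h, if_neg he]

theorem fe_lt_filled (n : Nat) (a : List Int) (i : Nat) (h : i < firstEmpty n a i) :
    i < n ∧ a.getD i 0 ≠ 0 := by
  by_cases hi : i < n
  · by_cases he : a.getD i 0 = 0
    · rw [fe_empty n a i hi he] at h; omega
    · exact ⟨hi, he⟩
  · rw [fe_stop n a i hi] at h; omega

theorem fe_at_empty (n : Nat) (a : List Int) (i : Nat) (h : firstEmpty n a i < n) :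
    a.getD (firstEmpty n a i) 0 = 0 := by
  fun_induction firstEmpty with
  | case1 i h1 h2 => exact h2
  | case2 i h1 h2 ih => exact ih h
  | case3 i h1 => omega

-- all cells of [i, j) are filled when j ≤ firstEmpty i; then firstEmpty restarts equal
theorem fe_skip (n : Nat) (a : List Int) (i j : Nat) (hij : i ≤ j)
    (hj : j ≤ firstEmpty n a i) : firstEmpty n a j = firstEmpty n a i := by
  induction j with
  | zero => interval_cases i; rfl
  | succ k ih =>
    rcases Nat.lt_or_ge i (k + 1) with hlt | hge
    · have hik : i ≤ k := by omega
      have hk : firstEmpty n a k = firstEmpty n a i := by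
        apply ih hik; omega
      have hkf : k < firstEmpty n a k := by omega
      obtain ⟨h1, h2⟩ := fe_lt_filled n a k hkf
      rw [← hk, ← fe_filled n a k h1 h2]
    · have hik : i = k + 1 := by omega
      rw [hik]

-- setting some cell to a nonzero value can only move the first empty cell further
theorem fe_set_mono (n : Nat) (a : List Int) (k : Nat) (z : Int) (hz : z ≠ 0) (i : Nat) :
    firstEmpty n a i ≤ firstEmpty n (a.set k z) i := by
  fun_induction firstEmpty n a i with
  | case1 i h1 h2 => exact fe_ge n (a.set k z) i (by omega)
  | case2 i h1 h2 ih =>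
    have he : (a.set k z).getD i 0 ≠ 0 := by
      by_cases hk : k = i
      · subst hk
        by_cases hkl : k < a.length
        · rw [getD_set_self a k z 0 hkl]; exact hz
        · rw [List.set_eq_of_length_le (by omega)]; exact h2
      · rw [getD_set_ne a k i z 0 hk]; exact h2
    rw [fe_filled n (a.set k z) i h1 he]; exact ih
  | case3 i h1 => rw [fe_stop n (a.set k z) i h1]

-- the pointer invariant: every filled cell points strictly forward, skipping no empty cell
def PtrInv (n : Nat) (a : List Int) (nxt : List Nat) : Prop :=
  ∀ x, x < n → a.getD x 0 ≠ 0 →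
    x < nxt.getD x (x + 1) ∧ nxt.getD x (x + 1) ≤ firstEmpty n a (x + 1)

theorem findRoot_spec (n : Nat) (a : List Int) (nxt : List Nat) (hI : PtrInv n a nxt) :
    ∀ fuel x, n - x < fuel →
      pvFindRoot n a nxt fuel x = if x < n then firstEmpty n a x else x := by
  intro fuel
  induction fuel with
  | zero => intro x hx; omega
  | succ f ih =>
    intro x hx
    by_cases hxn : x < n
    · by_cases he : a.getD x 0 = 0
      · rw [pvFindRoot, if_neg (by intro hc; exact hc.2 he), if_pos hxn,
          fe_empty n a x hxn he]
      · obtain ⟨h1, h2⟩ := hI x hxn he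
        have hyn : nxt.getD x (x + 1) ≤ n := le_trans h2 (fe_le n a (x + 1))
        rw [pvFindRoot, if_pos ⟨hxn, he⟩, ih _ (by omega), if_pos hxn]
        by_cases hyln : nxt.getD x (x + 1) < n
        · rw [if_pos hyln, fe_skip n a (x + 1) _ h1 h2, fe_filled n a x hxn he]
        · rw [if_neg hyln]
          have h3 := fe_ge n a (x + 1) (by omega)
          have h4 := fe_le n a (x + 1)
          rw [fe_filled n a x hxn he]; omega
    · rw [pvFindRoot, if_neg (by intro hc; exact hxn hc.1), if_neg hxn]

-- compression rewrites pointers of filled chain cells to r = their firstEmpty;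
-- the invariant survives (a is untouched)
theorem compress_inv (n : Nat) (a : List Int) (r : Nat) :
    ∀ (fuel x : Nat) (nxt : List Nat), PtrInv n a nxt →
      (x < n → a.getD x 0 ≠ 0 → firstEmpty n a x = r) →
      PtrInv n a (pvCompress n a r fuel nxt x) := by
  intro fuel
  induction fuel with
  | zero => intro x nxt hI _; rw [pvCompress]; exact hI
  | succ f ih =>
    intro x nxt hI hr
    rw [pvCompress]
    by_cases hc : x < n ∧ a.getD x 0 ≠ 0
    · rw [if_pos hc]
      obtain ⟨hxn, he⟩ := hc
      have hfe : firstEmpty n a x = r := hr hxn he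
      have hfe1 : firstEmpty n a (x + 1) = r := by
        rw [← fe_filled n a x hxn he]; exact hfe
      obtain ⟨h1, h2⟩ := hI x hxn he
      apply ih
      · intro w hw hwf
        by_cases hwx : x = w
        · subst hwx
          by_cases hxl : x < nxt.length
          · rw [getD_set_self nxt x r _ hxl]
            have hge := fe_ge n a (x + 1) (by omega)
            exact ⟨by omega, by omega⟩
          · rw [List.set_eq_of_length_le (by omega)]
            exact hI x hw hwf
        · rw [getD_set_ne nxt x w r _ hwx]
          exact hI w hw hwf
      · intro hyn hyf
        rw [fe_skip n a (x + 1) _ h1 h2]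
        exact hfe1
    · rw [if_neg hc]; exact hI

-- the full find: returns the first empty cell (clamped view) and preserves the invariant
theorem find_spec (n : Nat) (a : List Int) (nxt : List Nat) (x : Nat) (hI : PtrInv n a nxt) :
    (pvFind n a nxt x).2 = (if x < n then firstEmpty n a x else x) ∧
    PtrInv n a (pvFind n a nxt x).1 := by
  have hs : pvFindRoot n a nxt (n + 1) x = if x < n then firstEmpty n a x else x :=
    findRoot_spec n a nxt hI (n + 1) x (by omega)
  constructor
  · exact hs
  · apply compress_inv n a _ (n + 1) x nxt hI
    intro hxn _
    rw [hs, if_pos hxn]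

-- reference form of one pass: jump straight to the first empty cell each time
def specLoop (n : Nat) (z : Int) (a : List Int) (i m : Nat) : List Int :=
  if hfe : firstEmpty n a i < n then
    specLoop n z (a.set (firstEmpty n a i) z) (firstEmpty n a i + 2 ^ m + 1) (m + 1)
  else a
termination_by n - i
decreasing_by
  rcases Nat.lt_or_ge n i with h1 | h1
  · exfalso; rw [fe_stop n a i (by omega)] at hfe; omega
  · have h2 := fe_ge n a i h1
    have h3 := Nat.one_le_two_pow (n := m)
    omega

theorem specLoop_fe (n : Nat) (z : Int) (a : List Int) (i m : Nat) :
    specLoop n z a (firstEmpty n a i) m = specLoop n z a i m := by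
  by_cases h : firstEmpty n a i < n
  · have hidem : firstEmpty n a (firstEmpty n a i) = firstEmpty n a i :=
      fe_empty n a _ h (fe_at_empty n a i h)
    conv_lhs => rw [specLoop]
    conv_rhs => rw [specLoop]
    simp only [hidem]
  · have hn : firstEmpty n a i = n := by have := fe_le n a i; omega
    conv_lhs => rw [specLoop]
    conv_rhs => rw [specLoop]
    rw [hn, fe_stop n a n (by omega)]

theorem specLoop_filled (n : Nat) (z : Int) (a : List Int) (i m : Nat) (h : i < n)
    (he : a.getD i 0 ≠ 0) : specLoop n z a i m = specLoop n z a (i + 1) m := by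
  conv_lhs => rw [specLoop]
  conv_rhs => rw [specLoop]
  rw [fe_filled n a i h he]

theorem specLoop_stop (n : Nat) (z : Int) (a : List Int) (i m : Nat) (h : ¬ i < n) :
    specLoop n z a i m = a := by
  rw [specLoop, fe_stop n a i h, dif_neg (by omega : ¬ n < n)]

theorem specLoop_length (n : Nat) (z : Int) (a : List Int) (i m : Nat) :
    (specLoop n z a i m).length = a.length := by
  fun_induction specLoop with
  | case1 a i m hfe ih => rw [ih, List.length_set]
  | case2 a i m hfe => rfl

-- A's inner loop computes exactly the reference pass (its fuel is sufficient)
theorem innerA_spec (n : Nat) (z : Int) :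
    ∀ (fuel : Nat) (a : List Int) (i m : Nat), n - i < fuel →
    pvInnerA n z fuel a i m = specLoop n z a i m := by
  intro fuel
  induction fuel with
  | zero => intro a i m hf; omega
  | succ f ih =>
    intro a i m hf
    rw [pvInnerA]
    by_cases h : i < n
    · rw [if_pos h]
      by_cases he : a.getD i 0 = 0
      · rw [if_pos he, ih _ _ _ (by have := Nat.one_le_two_pow (n := m); omega)]
        conv_rhs => rw [specLoop]
        rw [fe_empty n a i h he, dif_pos h]
      · rw [if_neg he, ih _ _ _ (by omega), specLoop_filled n z a i m h he]
    · rw [if_neg h, specLoop_stop n z a i m h]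

-- B's inner loop computes the reference pass and keeps the invariant
theorem innerB_spec (n : Nat) (z : Int) (hz : z ≠ 0) :
    ∀ (fuel : Nat) (a : List Int) (nxt : List Nat) (i m : Nat),
      PtrInv n a nxt → a.length = n → n - i < fuel → (i < n → a.getD i 0 = 0) →
      (pvInnerB n z fuel a nxt i m).1 = specLoop n z a i m ∧
      PtrInv n (pvInnerB n z fuel a nxt i m).1 (pvInnerB n z fuel a nxt i m).2 := by
  intro fuel
  induction fuel with
  | zero => intro a nxt i m _ _ hf _; omega
  | succ f ih =>
    intro a nxt i m hI hlen hf hemp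
    rw [pvInnerB]
    by_cases hi : i < n
    · rw [if_pos hi]
      have he : a.getD i 0 = 0 := hemp hi
      have hInv' : PtrInv n (a.set i z) (nxt.set i (i + 1)) := by
        intro w hw hwf
        by_cases hwi : i = w
        · subst hwi
          have hval : (nxt.set i (i + 1)).getD i (i + 1) = i + 1 := by
            by_cases hl : i < nxt.length
            · exact getD_set_self nxt i (i + 1) _ hl
            · rw [List.set_eq_of_length_le (by omega), List.getD,
                List.getElem?_eq_none (by omega)]; rfl
          rw [hval]
          exact ⟨by omega, fe_ge n (a.set i z) (i + 1) (by omega)⟩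
        · rw [getD_set_ne nxt i w (i + 1) _ hwi]
          have hwf' : a.getD w 0 ≠ 0 := by
            rwa [getD_set_ne a i w z 0 hwi] at hwf
          obtain ⟨p1, p2⟩ := hI w hw hwf'
          exact ⟨p1, le_trans p2 (fe_set_mono n a i z hz (w + 1))⟩
      have hlen' : (a.set i z).length = n := by rw [List.length_set]; exact hlen
      have hfind := find_spec n (a.set i z) (nxt.set i (i + 1)) (i + 2 ^ m + 1) hInv'
      have hpow := Nat.one_le_two_pow (n := m)
      have hfuel' : n - (pvFind n (a.set i z) (nxt.set i (i + 1)) (i + 2 ^ m + 1)).2 < f := by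
        rw [hfind.1]
        by_cases htn : i + 2 ^ m + 1 < n
        · rw [if_pos htn]
          have := fe_ge n (a.set i z) (i + 2 ^ m + 1) (by omega)
          omega
        · rw [if_neg htn]; omega
      have hemp' : (pvFind n (a.set i z) (nxt.set i (i + 1)) (i + 2 ^ m + 1)).2 < n →
          (a.set i z).getD ((pvFind n (a.set i z) (nxt.set i (i + 1)) (i + 2 ^ m + 1)).2) 0 = 0 := by
        intro hlt
        rw [hfind.1] at hlt ⊢
        by_cases htn : i + 2 ^ m + 1 < n
        · rw [if_pos htn] at hlt ⊢
          exact fe_at_empty n (a.set i z) (i + 2 ^ m + 1) hlt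
        · rw [if_neg htn] at hlt; omega
      have key := ih (a.set i z)
        (pvFind n (a.set i z) (nxt.set i (i + 1)) (i + 2 ^ m + 1)).1
        (pvFind n (a.set i z) (nxt.set i (i + 1)) (i + 2 ^ m + 1)).2
        (m + 1) hfind.2 hlen' hfuel' hemp'
      have hspec : specLoop n z (a.set i z)
          ((pvFind n (a.set i z) (nxt.set i (i + 1)) (i + 2 ^ m + 1)).2) (m + 1) =
          specLoop n z a i m := by
        conv_rhs => rw [specLoop]
        rw [fe_empty n a i hi he, dif_pos hi, hfind.1]
        by_cases htn : i + 2 ^ m + 1 < n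
        · rw [if_pos htn, specLoop_fe]
        · rw [if_neg htn]
      constructor
      · show (pvInnerB n z f (a.set i z)
            (pvFind n (a.set i z) (nxt.set i (i + 1)) (i + 2 ^ m + 1)).1
            (pvFind n (a.set i z) (nxt.set i (i + 1)) (i + 2 ^ m + 1)).2 (m + 1)).1 =
            specLoop n z a i m
        rw [key.1, hspec]
      · show PtrInv n (pvInnerB n z f (a.set i z)
            (pvFind n (a.set i z) (nxt.set i (i + 1)) (i + 2 ^ m + 1)).1
            (pvFind n (a.set i z) (nxt.set i (i + 1)) (i + 2 ^ m + 1)).2 (m + 1)).1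
            (pvInnerB n z f (a.set i z)
            (pvFind n (a.set i z) (nxt.set i (i + 1)) (i + 2 ^ m + 1)).1
            (pvFind n (a.set i z) (nxt.set i (i + 1)) (i + 2 ^ m + 1)).2 (m + 1)).2
        exact key.2
    · rw [if_neg hi]
      constructor
      · show a = specLoop n z a i m
        rw [specLoop_stop n z a i m hi]
      · show PtrInv n a nxt
        exact hI

-- the two outer loops agree (same fuel on both sides), given the invariant
theorem outer_spec (n : Nat) : ∀ (k s : Nat) (a : List Int) (nxt : List Nat),
    PtrInv n a nxt → a.length = n →
    pvOuterA n k a (s : Int) s = pvOuterB n k a nxt s := by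
  intro k
  induction k with
  | zero => intro s a nxt _ _; rw [pvOuterA, pvOuterB]
  | succ f ih =>
    intro s a nxt hI hlen
    rw [pvOuterA, pvOuterB]
    by_cases hs : s < n
    · rw [if_pos hs, if_pos hs]
      have hfind := find_spec n a nxt s hI
      have hi : (pvFind n a nxt s).2 = firstEmpty n a s := by
        rw [hfind.1, if_pos hs]
      have hz : ((s : Int) + 1) ≠ 0 := by
        have := Int.natCast_nonneg s; omega
      have hemp : (pvFind n a nxt s).2 < n → a.getD ((pvFind n a nxt s).2) 0 = 0 := by
        intro h; rw [hi] at h ⊢; exact fe_at_empty n a s h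
      have key := innerB_spec n ((s : Int) + 1) hz (n + 1) a
        (pvFind n a nxt s).1 (pvFind n a nxt s).2 0 hfind.2 hlen (by omega) hemp
      have hq1 : (pvInnerB n ((s : Int) + 1) (n + 1) a
          (pvFind n a nxt s).1 (pvFind n a nxt s).2 0).1 =
          specLoop n ((s : Int) + 1) a s 0 := by
        rw [key.1, hi, specLoop_fe]
      show pvOuterA n f (pvInnerA n ((s : Int) + 1) (n + 1) a s 0) ((s : Int) + 1) (s + 1) =
        pvOuterB n f (pvInnerB n ((s : Int) + 1) (n + 1) a
          (pvFind n a nxt s).1 (pvFind n a nxt s).2 0).1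
          (pvInnerB n ((s : Int) + 1) (n + 1) a
          (pvFind n a nxt s).1 (pvFind n a nxt s).2 0).2 (s + 1)
      rw [innerA_spec n ((s : Int) + 1) (n + 1) a s 0 (by omega), hq1]
      have hI2 := key.2
      rw [hq1] at hI2
      have hlen2 : (specLoop n ((s : Int) + 1) a s 0).length = n := by
        rw [specLoop_length]; exact hlen
      have hcast : ((s : Int) + 1) = ((s + 1 : Nat) : Int) := by push_cast; ring
      rw [hcast]
      exact ih (s + 1) _ _ hI2 hlen2
    · rw [if_neg hs, if_neg hs]

theorem inv_init (n : Nat) :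
    PtrInv n (List.replicate n 0) ((List.range (n + 1)).map (· + 1)) := by
  intro x hx hf
  exfalso
  apply hf
  rw [List.getD, List.getElem?_replicate]
  simp [hx]

-- ===== VERDICT (by name: the statement is the Claim_ definition above) =====
theorem A364604_spec : Claim_equal_A364604 := by
  intro N _
  show A364604 N = A364604_alt N
  show pvOuterA N.toNat (N.toNat + 1) (List.replicate N.toNat 0) 0 0 =
    pvOuterB N.toNat (N.toNat + 1) (List.replicate N.toNat 0)
      ((List.range (N.toNat + 1)).map (· + 1)) 0
  have h0 : ((0 : Nat) : Int) = 0 := rfl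
  rw [← h0]
  exact outer_spec N.toNat (N.toNat + 1) 0 _ _ (inv_init N.toNat)
    (List.length_replicate)
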